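-- pv_equiv track=rewrite | github.com/edenai/edenai-apis | edenai_apis/utils/conversion.py | closest_below_value
-- ===== SOURCE A (Python) =====
-- def closest_below_value(input_list, input_value):
--     try:
--         below = min(
--             [i for i in input_list if i <= input_value] or input_list,
--             key=lambda x: abs(x - input_value),
--         )
--     except ValueError:
--         below = -1
--     return below
-- ===== SOURCE B (Python) =====
-- def closest_below_value(input_list, input_value):
--     best_below = None  # running max of elements <= input_value
--     best_any = None    # running min of the whole list
--     for x in input_list:
--         if x <= input_value:
--             if best_below is None or best_below < x:
--                 best_below = x
--         if best_any is None or x < best_any: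
--             best_any = x
--     if best_below is not None:
--         return best_below
--     if best_any is not None:
--         return best_any
--     return -1
-- ===== Notes on version B (the rewrite author's own statement) =====
-- stated objective: alternative
-- what changed: Replaces A's list-comprehension filter plus min(..., key=abs-distance) selection with a single explicit pass maintaining two accumulators (running max of elements <= value, running min of all elements), so no intermediate list is built and the list is traversed once.
import Mathlib
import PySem

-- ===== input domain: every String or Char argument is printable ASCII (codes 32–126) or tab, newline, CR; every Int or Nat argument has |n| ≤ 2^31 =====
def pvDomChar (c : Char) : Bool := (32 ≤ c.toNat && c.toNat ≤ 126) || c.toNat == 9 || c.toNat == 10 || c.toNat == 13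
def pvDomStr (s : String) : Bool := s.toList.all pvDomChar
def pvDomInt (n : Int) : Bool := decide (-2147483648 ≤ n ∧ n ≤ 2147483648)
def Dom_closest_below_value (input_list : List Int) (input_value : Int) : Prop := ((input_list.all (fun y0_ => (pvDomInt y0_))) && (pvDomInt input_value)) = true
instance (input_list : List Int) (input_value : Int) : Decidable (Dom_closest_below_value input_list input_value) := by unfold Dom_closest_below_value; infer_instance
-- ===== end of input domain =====

-- B replaces A's filter-then-min-by-absolute-distance with a single explicit pass keeping two accumulators (running max of elements ≤ value, running min of all); objective: alternative.


-- ===== PORT A =====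
def closest_below_value (input_list : List Int) (input_value : Int) : Int :=
  -- [i for i in input_list if i <= input_value] or input_list
  let cands := input_list.filter (fun i => decide (i ≤ input_value))
  let cands := if cands = [] then input_list else cands
  -- min(cands, key=lambda x: abs(x - input_value)); ValueError (empty) → -1
  match PySem.List.min? cands (fun x => |x - input_value|) with
  | some m => m
  | none => -1

-- ===== PORT B =====
-- one loop iteration of Source B: update (best_below, best_any) with x
def cbvStep (input_value : Int) (s : Option Int × Option Int) (x : Int) : Option Int × Option Int :=
  ((if x ≤ input_value then
      match s.1 with
      | none => some x
      | some b => if b < x then some x else some b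
    else s.1),
   (match s.2 with
    | none => some x
    | some a => if x < a then some x else some a))

def closest_below_value_alt (input_list : List Int) (input_value : Int) : Int :=
  let s := input_list.foldl (cbvStep input_value) (none, none)
  match s.1 with
  | some b => b
  | none =>
    match s.2 with
    | some a => a
    | none => -1

-- ===== PRECONDITION & SPEC =====
def Spec_closest_below_value (input_list : List Int) (input_value : Int) (out : Int) : Prop := out = closest_below_value_alt input_list input_value
instance (input_list : List Int) (input_value : Int) (out : Int) : Decidable (Spec_closest_below_value input_list input_value out) := by unfold Spec_closest_below_value; infer_instance

-- ===== CLAIM (what is proved, stated in full; the proofs are below) =====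
def Claim_equal_closest_below_value : Prop := ∀ (input_list : List Int) (input_value : Int), Dom_closest_below_value input_list input_value → Spec_closest_below_value input_list input_value (closest_below_value input_list input_value)

-- ===== LEMMAS AND PROOFS =====

-- fst of the fold: none iff it started none and no element passed the filter
lemma cbv_fst_none (v : Int) : ∀ (xs : List Int) (s : Option Int × Option Int),
    (xs.foldl (cbvStep v) s).1 = none ↔ s.1 = none ∧ xs.filter (fun i => decide (i ≤ v)) = [] := by
  intro xs
  induction xs with
  | nil => intro s; simp
  | cons x t ih =>
    intro s
    simp only [List.foldl_cons, List.filter_cons, ih]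
    by_cases hx : x ≤ v
    · simp only [hx, decide_true, if_true]
      constructor
      · rintro ⟨h1, -⟩
        exfalso
        simp only [cbvStep, hx, if_true] at h1
        cases h : s.1 <;> simp [h] at h1
        split at h1 <;> simp_all
      · rintro ⟨-, h2⟩; simp at h2
    · simp [cbvStep, hx]

-- fst of the fold: if some m, then m came from the start or the filtered list, bounds all of both
lemma cbv_fst_some (v : Int) : ∀ (xs : List Int) (s : Option Int × Option Int) (m : Int),
    (xs.foldl (cbvStep v) s).1 = some m →
      (s.1 = some m ∨ m ∈ xs.filter (fun i => decide (i ≤ v))) ∧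
      (∀ y ∈ xs.filter (fun i => decide (i ≤ v)), y ≤ m) ∧
      (∀ b, s.1 = some b → b ≤ m) := by
  intro xs
  induction xs with
  | nil => intro s m h; simp_all
  | cons x t ih =>
    intro s m h
    simp only [List.foldl_cons] at h
    obtain ⟨hmem, hub, hstart⟩ := ih _ m h
    by_cases hx : x ≤ v
    · have hstep : (cbvStep v s x).1 =
          match s.1 with
          | none => some x
          | some b => if b < x then some x else some b := by simp [cbvStep, hx]
      refine ⟨?_, ?_, ?_⟩
      · rcases hmem with hm | hm
        · rw [hstep] at hm
          cases hs : s.1 with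
          | none => right; simp [hs] at hm; subst hm; simp [hx]
          | some c =>
            simp [hs] at hm
            split at hm
            · right; simp at hm; subst hm; simp [hx]
            · left; simp_all
        · right; simp [hx]; right; simpa using hm
      · intro y hy
        simp only [List.filter_cons, hx, decide_true, if_true, List.mem_cons] at hy
        rcases hy with rfl | hy
        · rw [hstep] at hstart
          cases hs : s.1 with
          | none => exact hstart y (by simp [hs])
          | some b =>
            by_cases hb : b < y
            · exact hstart y (by simp [hs, hb])
            · have := hstart b (by simp [hs, hb]); omega
        · exact hub y hy
      · intro b hb
        rw [hstep] at hstart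
        cases hs : s.1 with
        | none => simp_all
        | some c =>
          have hc : c = b := by rw [hs] at hb; injection hb
          subst hc
          by_cases hlt : c < x
          · have := hstart x (by simp [hs, hlt]); omega
          · exact hstart c (by simp [hs, hlt])
    · have hstep : (cbvStep v s x).1 = s.1 := by simp [cbvStep, hx]
      rw [hstep] at hmem hstart
      refine ⟨?_, ?_, hstart⟩
      · rcases hmem with hm | hm
        · left; exact hm
        · right; simpa [List.filter_cons, hx] using hm
      · intro y hy
        simp only [List.filter_cons, hx, decide_false] at hy
        exact hub y hy

-- snd of the fold: if some m, then m is the running min of start and the list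
lemma cbv_snd_some (v : Int) : ∀ (xs : List Int) (s : Option Int × Option Int) (m : Int),
    (xs.foldl (cbvStep v) s).2 = some m →
      (s.2 = some m ∨ m ∈ xs) ∧ (∀ y ∈ xs, m ≤ y) ∧ (∀ a, s.2 = some a → m ≤ a) := by
  intro xs
  induction xs with
  | nil => intro s m h; simp_all
  | cons x t ih =>
    intro s m h
    simp only [List.foldl_cons] at h
    obtain ⟨hmem, hlb, hstart⟩ := ih _ m h
    have hstep : (cbvStep v s x).2 =
        match s.2 with
        | none => some x
        | some a => if x < a then some x else some a := by simp [cbvStep]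
    rw [hstep] at hmem hstart
    refine ⟨?_, ?_, ?_⟩
    · rcases hmem with hm | hm
      · cases hs : s.2 with
        | none => right; simp [hs] at hm; simp [hm]
        | some c =>
          simp [hs] at hm
          split at hm
          · right; simp at hm; subst hm; simp
          · left; simp_all
      · right; simp [hm]
    · intro y hy
      rcases List.mem_cons.mp hy with rfl | hy
      · cases hs : s.2 with
        | none => exact hstart y (by simp [hs])
        | some a =>
          by_cases ha : y < a
          · exact hstart y (by simp [hs, ha])
          · have := hstart a (by simp [hs, ha]); omega
      · exact hlb y hy
    · intro a ha
      cases hs : s.2 with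
      | none => simp_all
      | some c =>
        have hc : c = a := by rw [hs] at ha; injection ha
        subst hc
        by_cases hlt : x < c
        · have := hstart x (by simp [hs, hlt]); omega
        · exact hstart c (by simp [hs, hlt])

-- snd of the fold: none iff it started none and the list is empty
lemma cbv_snd_none (v : Int) : ∀ (xs : List Int) (s : Option Int × Option Int),
    (xs.foldl (cbvStep v) s).2 = none ↔ s.2 = none ∧ xs = [] := by
  intro xs
  induction xs with
  | nil => intro s; simp
  | cons x t ih =>
    intro s
    simp only [List.foldl_cons, ih]
    constructor
    · rintro ⟨h1, -⟩
      exfalso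
      simp only [cbvStep] at h1
      cases h : s.2 <;> simp [h] at h1
      split at h1 <;> simp_all
    · rintro ⟨-, h⟩; simp at h

-- ===== VERDICT (by name: the statement is the Claim_ definition above) =====
theorem closest_below_value_spec : Claim_equal_closest_below_value := by
  intro xs v _
  unfold Spec_closest_below_value closest_below_value closest_below_value_alt
  by_cases hb : xs.filter (fun i => decide (i ≤ v)) = []
  · -- no element ≤ v: A takes min over xs by |·-v|; B returns best_any (min of xs) or -1
    simp only [hb, if_true]
    have hfst : (xs.foldl (cbvStep v) (none, none)).1 = none :=
      (cbv_fst_none v xs (none, none)).mpr ⟨rfl, hb⟩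
    rw [hfst]
    have hall : ∀ y ∈ xs, ¬ (y ≤ v) := by
      intro y hy hle
      have : y ∈ xs.filter (fun i => decide (i ≤ v)) := by
        simp [List.mem_filter, hy, hle]
      simp [hb] at this
    cases hx : xs with
    | nil =>
      subst hx
      simp [PySem.List.min?]
    | cons z t =>
      rw [← hx]
      cases hA : PySem.List.min? xs (fun x => |x - v|) with
      | none =>
        exact absurd ((Iff.mp (PySem.List.min?_eq_none_iff _ _) hA)) (by simp [hx])
      | some a =>
        cases hB : (xs.foldl (cbvStep v) (none, none)).2 with
        | none =>
          have := ((cbv_snd_none v xs (none, none)).mp hB).2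
          simp [this] at hx
        | some m =>
          obtain ⟨hmem, hlb, -⟩ := cbv_snd_some v xs (none, none) m hB
          have hmMem : m ∈ xs := hmem.resolve_left (by simp)
          have haMem := PySem.List.min?_mem hA
          have h1 := PySem.List.min?_isMin hA m hmMem
          have hav := hall a haMem
          have hmv := hall m hmMem
          simp only at h1
          have e1 : |a - v| = a - v := abs_of_nonneg (by omega)
          have e2 : |m - v| = m - v := abs_of_nonneg (by omega)
          have h2 := hlb a haMem
          show a = m
          omega
  · -- some element ≤ v: A takes min over the filtered list by |·-v|; B returns best_below
    simp only [hb, if_false]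
    cases hA : PySem.List.min? (xs.filter (fun i => decide (i ≤ v))) (fun x => |x - v|) with
    | none => exact absurd ((Iff.mp (PySem.List.min?_eq_none_iff _ _) hA)) hb
    | some a =>
      cases hF : (xs.foldl (cbvStep v) (none, none)).1 with
      | none =>
        have := ((cbv_fst_none v xs (none, none)).mp hF).2
        exact absurd this hb
      | some m =>
        obtain ⟨hmem, hub, -⟩ := cbv_fst_some v xs (none, none) m hF
        have hmMem : m ∈ xs.filter (fun i => decide (i ≤ v)) := hmem.resolve_left (by simp)
        have haMem := PySem.List.min?_mem hA
        have h1 := PySem.List.min?_isMin hA m hmMem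
        have hav : a ≤ v := by have := (List.mem_filter.mp haMem).2; simpa using this
        have hmv : m ≤ v := by have := (List.mem_filter.mp hmMem).2; simpa using this
        simp only at h1
        have e1 : |a - v| = v - a := by rw [abs_sub_comm]; exact abs_of_nonneg (by omega)
        have e2 : |m - v| = v - m := by rw [abs_sub_comm]; exact abs_of_nonneg (by omega)
        have h2 := hub a haMem
        show a = m
        omega
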